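-- pv_equiv track=rewrite | github.com/neu-se/conflux | format_studies.py | format_study
-- ===== SOURCE A (Python) =====
-- def format_study(study_name, values, configuration_predictions_map, configuration_names):
--     marked = []
--     commands = []
--     result = [F"\\begin{{lstlisting}}[caption={{{study_name}}}, style=study]\n"]
--     for i in range(0, len(configuration_names)):
--         predictions = configuration_predictions_map[configuration_names[i]]
--         t_marked, t_commands = calculate_underlines(values, predictions, i)
--         marked.extend(t_marked)
--         commands.extend(t_commands)
--     marked = set(marked)
--     for i in range(0, len(values)):
--         if i in marked:
--             result.append(mark_position(i))
--         result.append(values[i])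
--     result.append(mark_position("END"))
--     result.append("\n\\end{lstlisting}\n")
--     result.append("\n".join(commands))
--     return ''.join(result)
--
-- def calculate_underlines(values, predictions, configuration_index):
--     start = -1
--     marked = []
--     commands = []
--     for i in range(0, len(values)):
--         value = values[i]
--         prediction = predictions[i]
--         if value == '\n':
--             if start != -1:
--                 # Stop line before i
--                 marked.append(i)
--                 commands.append(format_command(configuration_index, start, i))
--                 start = -1
--             continue
--         if prediction and start == -1:
--             # Start line before i
--             start = i
--             marked.append(i)
--         if not prediction and start != -1:
--             # Stop line before i
--             marked.append(i)
--             commands.append(format_command(configuration_index, start, i))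
--             start = -1
--     if start != -1:
--         commands.append(format_command(configuration_index, start, 'END'))
--     return marked, commands
--
-- def format_command(configuration_index, start, end):
--     commands = ['underlineA', 'underlineB', 'underlineC', 'underlineD']
--     return f"\\{commands[configuration_index]}{{{start}}}{{{end}}}"
--
-- def mark_position(name):
--     return f"!@\\tikzmark{{{name}}}@!"
-- ===== SOURCE B (Python) =====
-- from itertools import zip_longest
--
-- _UNDERLINE_COMMANDS = ['underlineA', 'underlineB', 'underlineC', 'underlineD']
--
--
-- def format_study(study_name, values, configuration_predictions_map, configuration_names):
--     n = len(values)
--     marked = set()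
--     commands = []
--     for ci, name in enumerate(configuration_names):
--         preds = configuration_predictions_map[name]
--         # stateless edge detection: active mask, then rising/falling edges
--         act = [bool(preds[i]) and values[i] != '\n' for i in range(n)]
--         starts = [i for i in range(n) if act[i] and (i == 0 or not act[i - 1])]
--         ends = [i for i in range(n) if not act[i] and i > 0 and act[i - 1]]
--         marked.update(starts)
--         marked.update(ends)
--         commands.extend(
--             f"\\{_UNDERLINE_COMMANDS[ci]}{{{s}}}{{{e if e is not None else 'END'}}}"
--             for s, e in zip_longest(starts, ends))
--     out = [f"\\begin{{lstlisting}}[caption={{{study_name}}}, style=study]\n"]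
--     for i in range(n):
--         if i in marked:
--             out.append(f"!@\\tikzmark{{{i}}}@!")
--         out.append(values[i])
--     out.append("!@\\tikzmark{END}@!")
--     out.append("\n\\end{lstlisting}\n")
--     out.append("\n".join(commands))
--     return ''.join(out)
-- ===== Notes on version B (the rewrite author's own statement) =====
-- stated objective: alternative
-- what changed: Replaces the sequential start-sentinel state machine by stateless staged passes: first materialize the active mask, then find run starts and run ends independently as rising/falling edges of the mask by comparing each index with its predecessor, and pair them with itertools.zip_longest (a missing end becomes 'END'); marks are the union of the edge sets.
import Mathlib
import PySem

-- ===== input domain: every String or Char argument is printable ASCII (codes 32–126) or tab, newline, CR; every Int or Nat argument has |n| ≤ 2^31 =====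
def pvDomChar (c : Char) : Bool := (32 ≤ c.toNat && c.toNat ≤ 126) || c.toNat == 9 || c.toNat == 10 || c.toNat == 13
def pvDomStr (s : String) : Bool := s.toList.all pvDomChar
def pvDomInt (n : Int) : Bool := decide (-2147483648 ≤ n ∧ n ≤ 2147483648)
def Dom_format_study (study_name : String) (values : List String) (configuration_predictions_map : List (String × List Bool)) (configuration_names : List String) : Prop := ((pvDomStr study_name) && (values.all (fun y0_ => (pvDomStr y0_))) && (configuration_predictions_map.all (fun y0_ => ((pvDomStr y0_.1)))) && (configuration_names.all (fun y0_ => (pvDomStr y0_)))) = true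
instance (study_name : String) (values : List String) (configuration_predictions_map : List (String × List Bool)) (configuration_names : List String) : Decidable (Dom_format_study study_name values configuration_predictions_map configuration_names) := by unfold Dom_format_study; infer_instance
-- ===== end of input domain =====

-- B replaces A's sequential start-sentinel state machine by stateless staged passes:
-- active mask, rising/falling edges by neighbour comparison, zip_longest pairing
-- (objective: alternative; same asymptotic cost).

-- ===== PORT A =====
-- format_command; start/end arrive already stringified (the f-string renders them);
-- the getD default is only reachable outside Pre_ (Python raises IndexError there).
def pvA_format_command (configuration_index : Nat) (start : String) (ed : String) : String :=
  "\\" ++ (["underlineA", "underlineB", "underlineC", "underlineD"].getD configuration_index "")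
    ++ "{" ++ start ++ "}{" ++ ed ++ "}"

def pvA_mark_position (name : String) : String :=
  "!@\\tikzmark{" ++ name ++ "}@!"

-- the for-loop of calculate_underlines, state (start, marked, commands); indexing via getD
-- is exact under Pre_ (inside Pre_ every index is in range; outside Python raises IndexError)
def pvA_calc_loop (values : List String) (predictions : List Bool) (ci : Nat) :
    List Nat → Int × List Int × List String → Int × List Int × List String
  | [], st => st
  | i :: rest, (start, marked, commands) =>
    let value := values.getD i ""
    let prediction := predictions.getD i false
    if value = "\n" then
      if start ≠ -1 then
        pvA_calc_loop values predictions ci rest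
          (-1, marked ++ [(i : Int)],
           commands ++ [pvA_format_command ci (PySem.Int.toStr start) (PySem.Int.toStr (i : Int))])
      else
        pvA_calc_loop values predictions ci rest (start, marked, commands)
    else
      let st1 : Int × List Int × List String :=
        if prediction = true ∧ start = -1 then ((i : Int), marked ++ [(i : Int)], commands)
        else (start, marked, commands)
      -- the second if reads the start already updated by the first one
      if prediction = false ∧ st1.1 ≠ -1 then
        pvA_calc_loop values predictions ci rest
          (-1, st1.2.1 ++ [(i : Int)],
           st1.2.2 ++ [pvA_format_command ci (PySem.Int.toStr st1.1) (PySem.Int.toStr (i : Int))])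
      else
        pvA_calc_loop values predictions ci rest st1

def pvA_calculate_underlines (values : List String) (predictions : List Bool) (ci : Nat) :
    List Int × List String :=
  let r := pvA_calc_loop values predictions ci (List.range values.length) (-1, [], [])
  if r.1 ≠ -1 then (r.2.1, r.2.2 ++ [pvA_format_command ci (PySem.Int.toStr r.1) "END"])
  else (r.2.1, r.2.2)

-- for i in range(len(configuration_names)): dict lookup is first match; getD [] only outside Pre_
def pvA_config_loop (values : List String) (cmap : List (String × List Bool)) :
    List String → Nat → List Int × List String → List Int × List String
  | [], _, acc => acc
  | name :: rest, ci, (marked, commands) =>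
    let predictions := ((cmap.find? (fun p => p.1 == name)).map (fun p => p.2)).getD []
    let t := pvA_calculate_underlines values predictions ci
    pvA_config_loop values cmap rest (ci + 1) (marked ++ t.1, commands ++ t.2)

def format_study (study_name : String) (values : List String)
    (configuration_predictions_map : List (String × List Bool))
    (configuration_names : List String) : String :=
  let mc := pvA_config_loop values configuration_predictions_map configuration_names 0 ([], [])
  let marked : PySem.Set Int := PySem.Set.ofList mc.1
  let result := (List.range values.length).foldl
    (fun (r : List String) (i : Nat) =>
      (if marked.contains (i : Int) then r ++ [pvA_mark_position (PySem.Int.toStr (i : Int))] else r)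
        ++ [values.getD i ""])
    ["\\begin{lstlisting}[caption={" ++ study_name ++ "}, style=study]\n"]
  PySem.Str.join ""
    (result ++ [pvA_mark_position "END", "\n\\end{lstlisting}\n", PySem.Str.join "\n" mc.2])

-- ===== PORT B =====
-- the module constant _UNDERLINE_COMMANDS of Source B
def pvB_underline_commands : List String := ["underlineA", "underlineB", "underlineC", "underlineD"]

-- itertools.zip_longest(starts, ends) rendered through the f-string: a missing end is
-- 'END'; a missing start would print Python's None as 'None' (unreachable in use)
def pvB_zip (ci : Nat) : List Nat → List Nat → List String
  | [], [] => []
  | s :: S, e :: E =>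
    ("\\" ++ pvB_underline_commands.getD ci "" ++ "{" ++ PySem.Int.toStr (s : Int)
      ++ "}{" ++ PySem.Int.toStr (e : Int) ++ "}") :: pvB_zip ci S E
  | s :: S, [] =>
    ("\\" ++ pvB_underline_commands.getD ci "" ++ "{" ++ PySem.Int.toStr (s : Int)
      ++ "}{END}") :: pvB_zip ci S []
  | [], e :: E =>
    ("\\" ++ pvB_underline_commands.getD ci "" ++ "{None}{" ++ PySem.Int.toStr (e : Int)
      ++ "}") :: pvB_zip ci [] E

-- the per-configuration loop of B: mask, edges, set updates, zip_longest commands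
def pvB_config_loop (values : List String) (cmap : List (String × List Bool)) :
    List String → Nat → PySem.Set Int × List String → PySem.Set Int × List String
  | [], _, acc => acc
  | name :: rest, ci, (marked, commands) =>
    let preds := ((cmap.find? (fun p => p.1 == name)).map (fun p => p.2)).getD []
    let n := values.length
    let act := (List.range n).map (fun i => preds.getD i false && !(values.getD i "" == "\n"))
    let starts := (List.range n).filter
      (fun i => act.getD i false && ((i == 0) || !(act.getD (i - 1) false)))
    let ends := (List.range n).filter
      (fun i => !(act.getD i false) && decide (0 < i) && act.getD (i - 1) false)
    let marked := PySem.Set.update (PySem.Set.update marked (starts.map (fun s => Int.ofNat s)))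
      (ends.map (fun e => Int.ofNat e))
    pvB_config_loop values cmap rest (ci + 1) (marked, commands ++ pvB_zip ci starts ends)

def format_study_alt (study_name : String) (values : List String)
    (configuration_predictions_map : List (String × List Bool))
    (configuration_names : List String) : String :=
  let mc := pvB_config_loop values configuration_predictions_map configuration_names 0
    (PySem.Set.empty, [])
  let out := (List.range values.length).foldl
    (fun (r : List String) (i : Nat) =>
      (if mc.1.contains (i : Int) then r ++ ["!@\\tikzmark{" ++ PySem.Int.toStr (i : Int) ++ "}@!"] else r)
        ++ [values.getD i ""])
    ["\\begin{lstlisting}[caption={" ++ study_name ++ "}, style=study]\n"]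
  PySem.Str.join ""
    (out ++ ["!@\\tikzmark{END}@!", "\n\\end{lstlisting}\n", PySem.Str.join "\n" mc.2])

-- ===== PRECONDITION & SPEC =====
-- Pre_ = exactly the inputs on which Python A returns: every configuration name is a key of the
-- dict (else KeyError), its prediction list covers all of values (else IndexError), and a
-- configuration with index ≥ 4 has no underline run (else format_command raises IndexError).
def Pre_format_study (study_name : String) (values : List String) (configuration_predictions_map : List (String × List Bool)) (configuration_names : List String) : Prop :=
  ∀ i ∈ List.range configuration_names.length,
    (configuration_predictions_map.find? (fun p => p.1 == configuration_names.getD i "")).isSome = true ∧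
    (let preds := ((configuration_predictions_map.find?
        (fun p => p.1 == configuration_names.getD i "")).map (fun p => p.2)).getD []
     values.length ≤ preds.length ∧
     (4 ≤ i → ∀ j ∈ List.range values.length,
        ¬(preds.getD j false = true ∧ values.getD j "" ≠ "\n")))
instance (study_name : String) (values : List String) (configuration_predictions_map : List (String × List Bool)) (configuration_names : List String) : Decidable (Pre_format_study study_name values configuration_predictions_map configuration_names) := by unfold Pre_format_study; infer_instance

def pvWitness_format_study : String × List String × (List (String × List Bool)) × List String :=
  ("s1", ["a", "\n", "b"], [("p", [true, false, true]), ("q", [false, false, true])], ["p", "q"])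

def Spec_format_study (study_name : String) (values : List String) (configuration_predictions_map : List (String × List Bool)) (configuration_names : List String) (out : String) : Prop := out = format_study_alt study_name values configuration_predictions_map configuration_names
instance (study_name : String) (values : List String) (configuration_predictions_map : List (String × List Bool)) (configuration_names : List String) (out : String) : Decidable (Spec_format_study study_name values configuration_predictions_map configuration_names out) := by unfold Spec_format_study; infer_instance

-- ===== CLAIM (what is proved, stated in full; the proofs are below) =====
def Claim_equal_format_study : Prop := ∀ (study_name : String) (values : List String) (configuration_predictions_map : List (String × List Bool)) (configuration_names : List String), Dom_format_study study_name values configuration_predictions_map configuration_names → Pre_format_study study_name values configuration_predictions_map configuration_names → Spec_format_study study_name values configuration_predictions_map configuration_names (format_study study_name values configuration_predictions_map configuration_names)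

-- ===== LEMMAS AND PROOFS =====

-- common reference recursion: state none = outside a run, some s = inside a run started at s
def pvSpec (key : Nat → Bool) (ci : Nat) : Nat → Nat → Option Nat → List Int × List String
  | _, 0, none => ([], [])
  | _, 0, some s => ([], [pvA_format_command ci (PySem.Int.toStr (s : Int)) "END"])
  | i, m + 1, none =>
    if key i then
      let t := pvSpec key ci (i + 1) m (some i)
      ((i : Int) :: t.1, t.2)
    else pvSpec key ci (i + 1) m none
  | i, m + 1, some s =>
    if key i then pvSpec key ci (i + 1) m (some s)
    else
      let t := pvSpec key ci (i + 1) m none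
      ((i : Int) :: t.1,
       pvA_format_command ci (PySem.Int.toStr (s : Int)) (PySem.Int.toStr (i : Int)) :: t.2)

def pvEnc : Option Nat → Int
  | none => -1
  | some s => (s : Int)

def pvKey (values : List String) (predictions : List Bool) (j : Nat) : Bool :=
  predictions.getD j false && !(values.getD j "" == "\n")

def pvFinish (ci : Nat) (r : Int × List Int × List String) : List Int × List String :=
  if r.1 ≠ -1 then (r.2.1, r.2.2 ++ [pvA_format_command ci (PySem.Int.toStr r.1) "END"])
  else (r.2.1, r.2.2)

theorem pvA_loop_spec (values : List String) (predictions : List Bool) (ci : Nat) :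
    ∀ (m i : Nat) (st : Option Nat) (mk : List Int) (cs : List String),
      pvFinish ci (pvA_calc_loop values predictions ci (List.range' i m) (pvEnc st, mk, cs))
        = (mk ++ (pvSpec (pvKey values predictions) ci i m st).1,
           cs ++ (pvSpec (pvKey values predictions) ci i m st).2) := by
  intro m
  induction m with
  | zero =>
    intro i st mk cs
    cases st with
    | none => simp [List.range', pvA_calc_loop, pvEnc, pvFinish, pvSpec]
    | some s =>
      have h : ¬((s:Int) = -1) := by omega
      simp [List.range', pvA_calc_loop, pvEnc, pvFinish, pvSpec, h]
  | succ m ih =>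
    intro i st mk cs
    rw [List.range'_succ]
    by_cases hv : values.getD i "" = "\n"
    · have hk : pvKey values predictions i = false := by
        unfold pvKey; rw [hv]; simp
      cases st with
      | none =>
        simp only [pvA_calc_loop, hv, pvEnc, if_pos rfl, reduceCtorEq, ne_eq,
          not_true_eq_false, if_false, pvSpec, hk, Bool.false_eq_true, if_neg]
        exact ih (i+1) none mk cs
      | some s =>
        have h : ¬((s:Int) = -1) := by omega
        simp only [pvA_calc_loop, hv, pvEnc, if_pos rfl, ne_eq, h, not_false_iff, if_true]
        rw [show (-1 : Int) = pvEnc none by simp [pvEnc], ih (i+1) none]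
        simp [pvSpec, hk, pvEnc]
    · cases hp : predictions.getD i false with
      | true =>
        have hk : pvKey values predictions i = true := by
          unfold pvKey; rw [hp]
          simp only [Bool.true_and, Bool.not_eq_true', beq_eq_false_iff_ne, ne_eq]
          exact hv
        cases st with
        | none =>
          simp only [pvA_calc_loop, if_neg hv, hp, pvEnc, and_self, if_pos, reduceCtorEq,
            false_and, if_neg, if_false, ite_true, ite_false]
          rw [show ((i:Nat):Int) = pvEnc (some i) from (by simp [pvEnc]), ih (i+1) (some i)]
          simp [pvSpec, hk, pvEnc]
        | some s =>
          have h : ¬((s:Int) = -1) := by omega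
          simp only [pvA_calc_loop, if_neg hv, hp, pvEnc, h, and_false, false_and, if_neg,
            if_false, ite_false, and_self, reduceCtorEq]
          rw [show ((s:Nat):Int) = pvEnc (some s) from (by simp [pvEnc]), ih (i+1) (some s)]
          simp [pvSpec, hk, pvEnc]
      | false =>
        have hk : pvKey values predictions i = false := by
          unfold pvKey; rw [hp]; simp
        cases st with
        | none =>
          simp only [pvA_calc_loop, if_neg hv, hp, pvEnc, false_and, if_neg, if_false,
            ite_false, and_true, true_and, ne_eq, not_true_eq_false, reduceCtorEq]
          rw [show (-1:Int) = pvEnc none from (by simp [pvEnc]), ih (i+1) none]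
          simp [pvSpec, hk, pvEnc]
        | some s =>
          have h : ¬((s:Int) = -1) := by omega
          simp only [pvA_calc_loop, if_neg hv, hp, pvEnc, false_and, if_neg, if_false,
            ite_false, true_and, ne_eq, h, not_false_iff, if_true, if_pos]
          simp only [and_false, false_and, ite_false, if_neg (by simp : ¬(false = true ∧ False))]
          rw [if_pos (by exact h)]
          rw [show (-1:Int) = pvEnc none from (by simp [pvEnc]), ih (i+1) none]
          simp [pvSpec, hk, pvEnc]

def pvRunLen (key : Nat → Bool) (b : Bool) : Nat → Nat → Nat
  | _, 0 => 0
  | i, m + 1 => if key i = b then pvRunLen key b (i + 1) m + 1 else 0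

theorem pvRunLen_succ (key : Nat → Bool) (b : Bool) (i m : Nat) :
    pvRunLen key b i (m + 1) = if key i = b then pvRunLen key b (i + 1) m + 1 else 0 := rfl

theorem pvRunLen_le (key : Nat → Bool) (b : Bool) :
    ∀ (m i : Nat), pvRunLen key b i m ≤ m := by
  intro m
  induction m with
  | zero => intro i; simp [pvRunLen]
  | succ m ih =>
    intro i
    unfold pvRunLen
    split
    · exact Nat.succ_le_succ (ih (i+1))
    · omega

theorem pvRunLen_pos (key : Nat → Bool) (b : Bool) (m i : Nat) (hm : 0 < m)
    (hb : key i = b) : 1 ≤ pvRunLen key b i m := by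
  obtain ⟨m', rfl⟩ : ∃ m', m = m' + 1 := ⟨m - 1, by omega⟩
  unfold pvRunLen
  rw [if_pos hb]
  omega

theorem pvRunLen_key (key : Nat → Bool) (b : Bool) :
    ∀ (m i j : Nat), i ≤ j → j < i + pvRunLen key b i m → key j = b := by
  intro m
  induction m with
  | zero => intro i j h1 h2; simp [pvRunLen] at h2; omega
  | succ m ih =>
    intro i j h1 h2
    unfold pvRunLen at h2
    by_cases hb : key i = b
    · rw [if_pos hb] at h2
      rcases Nat.eq_or_lt_of_le h1 with rfl | h1'
      · exact hb
      · exact ih (i+1) j h1' (by omega)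
    · rw [if_neg hb] at h2; omega

theorem pvRunLen_after (key : Nat → Bool) (b : Bool) :
    ∀ (m i : Nat), pvRunLen key b i m < m → key (i + pvRunLen key b i m) ≠ b := by
  intro m
  induction m with
  | zero => intro i h; omega
  | succ m ih =>
    intro i h
    by_cases hb : key i = b
    · have e : pvRunLen key b i (m+1) = pvRunLen key b (i+1) m + 1 := by
        rw [pvRunLen_succ, if_pos hb]
      rw [e] at h ⊢
      have := ih (i+1) (by omega)
      simpa [Nat.add_assoc, Nat.add_comm 1] using this
    · have e : pvRunLen key b i (m+1) = 0 := by rw [pvRunLen_succ, if_neg hb]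
      rw [e]; simpa using hb

theorem pvSkipTrue (key : Nat → Bool) (ci : Nat) :
    ∀ (r i m s : Nat), (∀ j, i ≤ j → j < i + r → key j = true) →
      pvSpec key ci i (r + m) (some s) = pvSpec key ci (i + r) m (some s) := by
  intro r
  induction r with
  | zero => intro i m s _; simp
  | succ r ih =>
    intro i m s hk
    have h1 : r + 1 + m = (r + m) + 1 := by omega
    rw [h1]
    have h2 : key i = true := hk i (by omega) (by omega)
    show (if key i then pvSpec key ci (i+1) (r+m) (some s) else _) = _
    rw [if_pos h2, ih (i+1) m s (fun j hj1 hj2 => hk j (by omega) (by omega))]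
    congr 1
    omega

theorem pvSkipFalse (key : Nat → Bool) (ci : Nat) :
    ∀ (r i m : Nat), (∀ j, i ≤ j → j < i + r → key j = false) →
      pvSpec key ci i (r + m) none = pvSpec key ci (i + r) m none := by
  intro r
  induction r with
  | zero => intro i m _; simp
  | succ r ih =>
    intro i m hk
    have h1 : r + 1 + m = (r + m) + 1 := by omega
    rw [h1]
    have h2 : key i = false := hk i (by omega) (by omega)
    show (if key i then _ else pvSpec key ci (i+1) (r+m) none) = _
    rw [if_neg (by simp [h2]), ih (i+1) m (fun j hj1 hj2 => hk j (by omega) (by omega))]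
    congr 1
    omega

-- the edge predicates of B, phrased on the key function
def pvP (key : Nat → Bool) (i : Nat) : Bool := key i && ((i == 0) || !key (i - 1))
def pvQ (key : Nat → Bool) (i : Nat) : Bool := !key i && decide (0 < i) && key (i - 1)

-- inside a true-run (with a true predecessor) no edge fires
theorem pvEdges_inner_true (key : Nat → Bool) :
    ∀ (r i : Nat), 0 < i → (∀ j, i - 1 ≤ j → j < i + r → key j = true) →
      (List.range' i r).filter (pvP key) = [] ∧ (List.range' i r).filter (pvQ key) = [] := by
  intro r
  induction r with
  | zero => intro i _ _; simp
  | succ r ih =>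
    intro i hi hk
    have hki : key i = true := hk i (by omega) (by omega)
    have hkp : key (i - 1) = true := hk (i - 1) (by omega) (by omega)
    have hp : pvP key i = false := by
      simp [pvP, hki, hkp, Nat.pos_iff_ne_zero.mp hi]
    have hq : pvQ key i = false := by simp [pvQ, hki]
    rw [List.range'_succ]
    have := ih (i + 1) (by omega) (fun j h1 h2 => hk j (by omega) (by omega))
    simp [List.filter_cons, hp, hq, this.1, this.2]

-- inside a false-run starting at a non-start position no edge fires
theorem pvEdges_inner_false (key : Nat → Bool) :
    ∀ (r i : Nat), (i = 0 ∨ key (i - 1) = false) → (∀ j, i ≤ j → j < i + r → key j = false) →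
      (List.range' i r).filter (pvP key) = [] ∧ (List.range' i r).filter (pvQ key) = [] := by
  intro r
  induction r with
  | zero => intro i _ _; simp
  | succ r ih =>
    intro i hprev hk
    have hki : key i = false := hk i (by omega) (by omega)
    have hp : pvP key i = false := by simp [pvP, hki]
    have hq : pvQ key i = false := by
      rcases hprev with h0 | hf
      · simp [pvQ, h0]
      · simp [pvQ, hf]
    rw [List.range'_succ]
    have := ih (i + 1) (Or.inr (by simpa using hki)) (fun j h1 h2 => hk j (by omega) (by omega))
    simp [List.filter_cons, hp, hq, this.1, this.2]

-- MAIN: the state machine's output from state none equals edge detection + zip_longest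
set_option maxHeartbeats 1000000 in
theorem pvEdge_spec (key : Nat → Bool) (ci : Nat) :
    ∀ (m i : Nat), (i = 0 ∨ key (i - 1) = false) →
      (pvSpec key ci i m none).2
          = pvB_zip ci ((List.range' i m).filter (pvP key)) ((List.range' i m).filter (pvQ key))
      ∧ ∀ (x : Int), x ∈ (pvSpec key ci i m none).1 ↔
          x ∈ ((List.range' i m).filter (pvP key)).map (fun s => Int.ofNat s)
            ++ ((List.range' i m).filter (pvQ key)).map (fun e => Int.ofNat e) := by
  intro m
  induction m using Nat.strong_induction_on with
  | _ m ihs =>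
    intro i hprev
    cases m with
    | zero => simp [pvSpec, pvB_zip]
    | succ m0 =>
      set r := pvRunLen key (key i) i (m0+1) with hrdef
      have hrle : r ≤ m0 + 1 := pvRunLen_le key (key i) (m0+1) i
      have hr1 : 1 ≤ r := pvRunLen_pos key (key i) (m0+1) i (by omega) rfl
      have hrun : ∀ j, i ≤ j → j < i + r → key j = key i :=
        fun j h1 h2 => pvRunLen_key key (key i) (m0+1) i j h1 h2
      have hsplit : List.range' i (m0+1) = List.range' i r ++ List.range' (i+r) (m0+1-r) := by
        have hap : List.range' i r 1 ++ List.range' (i + 1 * r) (m0+1-r) 1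
            = List.range' i (r + (m0+1-r)) 1 := List.range'_append
        rw [Nat.one_mul] at hap
        conv_lhs => rw [show m0 + 1 = r + (m0+1-r) by omega]
        rw [← hap]
      cases hki : key i with
      | false =>
        -- false run, then recurse
        have hfil := pvEdges_inner_false key r i hprev
          (fun j h1 h2 => by rw [hrun j h1 h2, hki])
        have hrest := ihs (m0+1-r) (by omega) (i+r)
          (Or.inr (by rw [show i+r-1 = i+(r-1) by omega, hrun _ (by omega) (by omega), hki]))
        have hskip : pvSpec key ci i (m0+1) none = pvSpec key ci (i+r) (m0+1-r) none := by
          have := pvSkipFalse key ci r i (m0+1-r)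
            (fun j h1 h2 => by rw [hrun j h1 h2, hki])
          rw [show r + (m0+1-r) = m0+1 by omega] at this
          exact this
        rw [hskip, hsplit]
        simp only [List.filter_append, hfil.1, hfil.2, List.nil_append]
        exact hrest
      | true =>
        -- true run [i, i+r): starts gets i, the run interior has no edges
        have hpI : pvP key i = true := by
          rcases hprev with rfl | hf
          · simp [pvP, hki]
          · simp [pvP, hki, hf]
        have hqI : pvQ key i = false := by simp [pvQ, hki]
        have hinner := pvEdges_inner_true key (r-1) (i+1) (by omega)
          (fun j h1 h2 => by rw [hrun j (by omega) (by omega)]; exact hki)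
        have hrunsplit : List.range' i r = i :: List.range' (i+1) (r-1) := by
          conv_lhs => rw [show r = (r-1)+1 by omega]
          rw [List.range'_succ]
        have hSrun : (List.range' i r).filter (pvP key) = [i] := by
          rw [hrunsplit]; simp [List.filter_cons, hpI, hinner.1]
        have hErun : (List.range' i r).filter (pvQ key) = [] := by
          rw [hrunsplit]; simp [List.filter_cons, hqI, hinner.2]
        -- state machine: one step at i, then skip the rest of the run
        have hstep : pvSpec key ci i (m0+1) none
            = ((i : Int) :: (pvSpec key ci (i+r) (m0+1-r) (some i)).1,
               (pvSpec key ci (i+r) (m0+1-r) (some i)).2) := by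
          have h1 : pvSpec key ci i (m0+1) none
              = ((i : Int) :: (pvSpec key ci (i+1) m0 (some i)).1,
                 (pvSpec key ci (i+1) m0 (some i)).2) := by
            show (if key i then _ else _) = _
            rw [if_pos hki]
          have hsk := pvSkipTrue key ci (r-1) (i+1) (m0+1-r) i
            (fun j h1 h2 => by rw [hrun j (by omega) (by omega)]; exact hki)
          rw [show r-1 + (m0+1-r) = m0 by omega, show i+1+(r-1) = i+r by omega] at hsk
          rw [h1, hsk]
        by_cases hlt : r < m0 + 1
        · -- run ends at i+r < i+m: falling edge at i+r
          have hafter : key (i + r) = false := by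
            have := pvRunLen_after key (key i) (m0+1) i (by omega)
            rw [← hrdef, hki] at this
            simpa using this
          have hpE : pvP key (i+r) = false := by simp [pvP, hafter]
          have hqE : pvQ key (i+r) = true := by
            have : key (i+r-1) = true := by
              rw [show i+r-1 = i+(r-1) by omega, hrun _ (by omega) (by omega), hki]
            simp [pvQ, hafter, this]
            omega
          have hrest := ihs (m0+1-r-1) (by omega) (i+r+1)
            (Or.inr (by rw [show i+r+1-1 = i+r by omega]; exact hafter))
          -- the drop of state some i at index i+r
          have hdrop : pvSpec key ci (i+r) (m0+1-r) (some i)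
              = (((i+r : Nat) : Int) :: (pvSpec key ci (i+r+1) (m0+1-r-1) none).1,
                 pvA_format_command ci (PySem.Int.toStr (i : Int)) (PySem.Int.toStr ((i+r : Nat) : Int))
                   :: (pvSpec key ci (i+r+1) (m0+1-r-1) none).2) := by
            conv_lhs => rw [show m0+1-r = (m0+1-r-1)+1 by omega]
            show (if key (i+r) then _ else _) = _
            rw [if_neg (by simp [hafter])]
          have hsplit2 : List.range' (i+r) (m0+1-r)
              = (i+r) :: List.range' (i+r+1) (m0+1-r-1) := by
            conv_lhs => rw [show m0+1-r = (m0+1-r-1)+1 by omega]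
            rw [List.range'_succ]
          constructor
          · rw [hstep, hdrop, hsplit, hsplit2]
            simp only [List.filter_append, hSrun, hErun, List.filter_cons, hpE, hqE,
              Bool.false_eq_true, if_false, if_true, List.nil_append, List.singleton_append]
            rw [hrest.1]
            simp [pvB_zip, pvA_format_command, pvB_underline_commands]
          · intro x
            rw [hstep, hdrop, hsplit, hsplit2]
            simp only [List.filter_append, hSrun, hErun, List.filter_cons, hpE, hqE,
              Bool.false_eq_true, if_false, if_true, List.nil_append, List.singleton_append,
              List.map_cons, List.map_append, List.mem_cons, List.mem_append]
            have hmem := hrest.2 x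
            simp only [List.mem_append] at hmem
            rw [hmem]
            tauto
        · -- run reaches the end: END command, no end mark
          have hrm : r = m0 + 1 := by omega
          have hz : m0 + 1 - r = 0 := by omega
          rw [hstep, hz]
          have hS : (List.range' i (m0+1)).filter (pvP key) = [i] := by
            rw [← hrm]; exact hSrun
          have hE : (List.range' i (m0+1)).filter (pvQ key) = [] := by
            rw [← hrm]; exact hErun
          rw [hS, hE]
          constructor
          · show ((i : Int) :: (pvSpec key ci (i+r) 0 (some i)).1,
              (pvSpec key ci (i+r) 0 (some i)).2).2 = pvB_zip ci [i] []
            simp only [pvSpec, pvB_zip]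
            simp [pvA_format_command, pvB_underline_commands]
            rw [show ("}{END}" : String) = "}{" ++ "END" ++ "}" from rfl]
            simp [String.append_assoc]
          · intro x
            show x ∈ ((i : Int) :: (pvSpec key ci (i+r) 0 (some i)).1,
              (pvSpec key ci (i+r) 0 (some i)).2).1 ↔ _
            simp [pvSpec]

-- per-configuration equality: A's calculate_underlines vs B's edges (commands equal,
-- marks membership-equal)
theorem pv_per_config (values : List String) (preds : List Bool) (ci : Nat) :
    (pvA_calculate_underlines values preds ci).2
        = pvB_zip ci
            ((List.range values.length).filter (pvP (pvKey values preds)))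
            ((List.range values.length).filter (pvQ (pvKey values preds)))
      ∧ ∀ (x : Int), x ∈ (pvA_calculate_underlines values preds ci).1 ↔
          x ∈ ((List.range values.length).filter (pvP (pvKey values preds))).map (fun s => Int.ofNat s)
            ++ ((List.range values.length).filter (pvQ (pvKey values preds))).map (fun e => Int.ofNat e) := by
  have hA := pvA_loop_spec values preds ci values.length 0 none [] []
  have hcalc : pvA_calculate_underlines values preds ci
      = pvSpec (pvKey values preds) ci 0 values.length none := by
    have : pvA_calculate_underlines values preds ci
        = pvFinish ci (pvA_calc_loop values preds ci (List.range' 0 values.length)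
            (pvEnc none, [], [])) := by
      rw [← List.range_eq_range']; rfl
    rw [this, hA]; simp
  have hE := pvEdge_spec (pvKey values preds) ci values.length 0 (Or.inl rfl)
  rw [hcalc, List.range_eq_range']
  exact hE

-- B's inline filters over the materialized mask equal the pvP/pvQ filters
theorem pvActGetD (values : List String) (preds : List Bool) (i : Nat)
    (h : i < values.length) :
    ((List.range values.length).map
        (fun j => preds.getD j false && !(values.getD j "" == "\n"))).getD i false
      = pvKey values preds i := by
  rw [List.getD_eq_getElem?_getD, List.getElem?_map]
  simp [List.getElem?_range, h, pvKey]

theorem pvB_filters (values : List String) (preds : List Bool) :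
    ((List.range values.length).filter
        (fun i => (((List.range values.length).map
            (fun j => preds.getD j false && !(values.getD j "" == "\n"))).getD i false)
          && ((i == 0) || !(((List.range values.length).map
            (fun j => preds.getD j false && !(values.getD j "" == "\n"))).getD (i-1) false)))
      = (List.range values.length).filter (pvP (pvKey values preds)))
    ∧ ((List.range values.length).filter
        (fun i => !(((List.range values.length).map
            (fun j => preds.getD j false && !(values.getD j "" == "\n"))).getD i false)
          && decide (0 < i) && (((List.range values.length).map
            (fun j => preds.getD j false && !(values.getD j "" == "\n"))).getD (i-1) false))
      = (List.range values.length).filter (pvQ (pvKey values preds))) := by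
  constructor
  · apply List.filter_congr
    intro i hi
    have hin : i < values.length := List.mem_range.mp hi
    rw [pvActGetD values preds i hin, pvActGetD values preds (i-1) (by omega)]
    rfl
  · apply List.filter_congr
    intro i hi
    have hin : i < values.length := List.mem_range.mp hi
    rw [pvActGetD values preds i hin, pvActGetD values preds (i-1) (by omega)]
    rfl

-- the config loops: B's commands equal A's and B's marked set has A's members
theorem pv_loops (values : List String) (cmap : List (String × List Bool)) :
    ∀ (names : List String) (ci : Nat) (mkA : List Int) (cs : List String)
      (mkB : PySem.Set Int),
      (∀ x : Int, x ∈ mkB ↔ x ∈ mkA) →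
      (pvB_config_loop values cmap names ci (mkB, cs)).2
          = (pvA_config_loop values cmap names ci (mkA, cs)).2
        ∧ ∀ x : Int, x ∈ (pvB_config_loop values cmap names ci (mkB, cs)).1 ↔
            x ∈ (pvA_config_loop values cmap names ci (mkA, cs)).1 := by
  intro names
  induction names with
  | nil =>
    intro ci mkA cs mkB hmk
    exact ⟨rfl, hmk⟩
  | cons name rest ih =>
    intro ci mkA cs mkB hmk
    simp only [pvA_config_loop, pvB_config_loop]
    set preds := ((cmap.find? (fun p => p.1 == name)).map (fun p => p.2)).getD [] with hpreds
    have hf := pvB_filters values preds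
    have hc := pv_per_config values preds ci
    rw [hf.1, hf.2, ← hc.1]
    apply ih
    intro x
    rw [PySem.Set.mem_update, PySem.Set.mem_update, hmk, List.mem_append]
    rw [hc.2 x, List.mem_append]
    tauto

-- ===== VERDICT (by name: the statement is the Claim_ definition above) =====
theorem format_study_spec : Claim_equal_format_study := by
  intro study_name values cmap names _ _
  have h := pv_loops values cmap names 0 [] [] PySem.Set.empty (fun x => Iff.rfl)
  have hcont : ∀ i : Nat,
      (PySem.Set.ofList (pvA_config_loop values cmap names 0 ([], [])).1).contains (i : Int)
        = (pvB_config_loop values cmap names 0 (PySem.Set.empty, [])).1.contains (i : Int) := by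
    intro i
    rw [Bool.eq_iff_iff, PySem.Set.contains_iff, PySem.Set.contains_iff, PySem.Set.mem_ofList]
    exact (h.2 _).symm
  have hfold :
      (fun (r : List String) (i : Nat) =>
        (if (PySem.Set.ofList (pvA_config_loop values cmap names 0 ([], [])).1).contains (i : Int)
          then r ++ [pvA_mark_position (PySem.Int.toStr (i : Int))] else r) ++ [values.getD i ""])
      = (fun (r : List String) (i : Nat) =>
        (if (pvB_config_loop values cmap names 0 (PySem.Set.empty, [])).1.contains (i : Int)
          then r ++ ["!@\\tikzmark{" ++ PySem.Int.toStr (i : Int) ++ "}@!"] else r)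
          ++ [values.getD i ""]) := by
    funext r i
    rw [hcont i]
    rfl
  simp only [Spec_format_study, format_study, format_study_alt]
  rw [hfold, h.1]
  rfl
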